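-- pv_equiv track=rewrite | github.com/Seayok/Terminal-Simulator | nautilus.py | check_format_string
-- ===== SOURCE A (Python) =====
-- def check_format_string(remain):
--
--     if len(remain) < 1:
--         return False
--
--     index = 0
--     while index < len(remain) and remain[index] in 'uoa':
--         index += 1
--
--     # uoa[+=-] not in remain or [uoa...] is the only thing remain contains
--     if (index == 0 and remain[0] not in '-+=') or index == len(remain):
--         return False
--     elif remain[index] not in '-+=':
--         return False
--     else:
--         if len(remain) - index > 1:  # Avoid a=
--             for char in remain[index + 1:]:
--                 if char not in 'rwx':
--                     return False
--     return True
-- ===== SOURCE B (Python) =====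
-- def check_format_string(remain):
--     # Single-pass DFA: state 0 = reading the u/o/a prefix, state 1 = past the
--     # one operator; accept iff the scan ends in state 1.
--     state = 0
--     for ch in remain:
--         if state == 0:
--             if ch in 'uoa':
--                 continue
--             if ch in '-+=':
--                 state = 1
--             else:
--                 return False
--         elif ch not in 'rwx':
--             return False
--     return state == 1
-- ===== Notes on version B (the rewrite author's own statement) =====
-- stated objective: alternative
-- what changed: Replaces A's staged prefix-scan (index while-loop, separate operator branch chain, then a suffix loop) with a single left-to-right pass of a two-state machine (before/after the operator) that rejects on the first bad transition and accepts iff it ends past the operator.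
import Mathlib
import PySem

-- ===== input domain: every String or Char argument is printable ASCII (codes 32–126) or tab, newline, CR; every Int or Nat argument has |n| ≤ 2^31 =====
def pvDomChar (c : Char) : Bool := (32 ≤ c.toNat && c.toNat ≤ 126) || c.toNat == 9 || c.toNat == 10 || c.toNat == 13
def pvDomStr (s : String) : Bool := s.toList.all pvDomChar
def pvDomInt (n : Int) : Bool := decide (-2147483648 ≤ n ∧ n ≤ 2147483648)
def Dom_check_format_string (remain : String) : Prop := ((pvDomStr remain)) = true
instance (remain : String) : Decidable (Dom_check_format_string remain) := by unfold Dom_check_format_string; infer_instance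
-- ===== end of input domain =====

-- B replaces A's staged prefix-scan + branch chain + suffix loop with a single-pass two-state machine; same O(n), different traversal.


-- ===== PORT A =====
-- while loop scanning a 'uoa' prefix ported as takeWhile-length; in-range indexing remain[i] ported as getD
def check_format_string (remain : String) : Bool :=
  let cs := remain.toList
  if cs.length < 1 then false
  else
    let index := (cs.takeWhile (fun c => c == 'u' || c == 'o' || c == 'a')).length
    if (index == 0 && !(cs.getD 0 ' ' == '-' || cs.getD 0 ' ' == '+' || cs.getD 0 ' ' == '=')) || index == cs.length then
      false
    else if !(cs.getD index ' ' == '-' || cs.getD index ' ' == '+' || cs.getD index ' ' == '=') then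
      false
    else if cs.length - index > 1 then
      (cs.drop (index + 1)).all (fun c => c == 'r' || c == 'w' || c == 'x')
    else true

-- ===== PORT B =====
-- the for-loop with early return ported as structural recursion carrying the state (0 = prefix, 1 = past operator)
def cfsGo : List Char → Nat → Bool
  | [], st => st == 1
  | c :: cs, 0 =>
    if c == 'u' || c == 'o' || c == 'a' then cfsGo cs 0
    else if c == '-' || c == '+' || c == '=' then cfsGo cs 1
    else false
  | c :: cs, _ + 1 =>
    if c == 'r' || c == 'w' || c == 'x' then cfsGo cs 1 else false

def check_format_string_alt (remain : String) : Bool :=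
  cfsGo remain.toList 0

-- ===== PRECONDITION & SPEC =====
def Spec_check_format_string (remain : String) (out : Bool) : Prop := out = check_format_string_alt remain
instance (remain : String) (out : Bool) : Decidable (Spec_check_format_string remain out) := by unfold Spec_check_format_string; infer_instance

-- ===== CLAIM (what is proved, stated in full; the proofs are below) =====
def Claim_equal_check_format_string : Prop := ∀ (remain : String), Dom_check_format_string remain → Spec_check_format_string remain (check_format_string remain)

-- ===== LEMMAS AND PROOFS =====

theorem cfsGo_one (ds : List Char) :
    cfsGo ds 1 = ds.all (fun c => c == 'r' || c == 'w' || c == 'x') := by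
  induction ds with
  | nil => rfl
  | cons c rest ih =>
    by_cases h : (c == 'r' || c == 'w' || c == 'x') = true
    · simp [cfsGo, h, ih]
    · simp only [Bool.not_eq_true] at h
      simp [cfsGo, h]

theorem cfsGo_zero (cs : List Char) :
    cfsGo cs 0 =
      match cs.dropWhile (fun c => c == 'u' || c == 'o' || c == 'a') with
      | [] => false
      | c :: ds => (c == '-' || c == '+' || c == '=') &&
                   ds.all (fun c => c == 'r' || c == 'w' || c == 'x') := by
  induction cs with
  | nil => rfl
  | cons c rest ih =>
    by_cases hu : (c == 'u' || c == 'o' || c == 'a') = true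
    · simp [cfsGo, hu, ih, List.dropWhile]
    · simp only [Bool.not_eq_true] at hu
      by_cases hop : (c == '-' || c == '+' || c == '=') = true
      · simp [cfsGo, hu, hop, List.dropWhile, cfsGo_one]
      · simp only [Bool.not_eq_true] at hop
        simp [cfsGo, hu, hop, List.dropWhile]

theorem drop_takeWhile_len (p : Char → Bool) (cs : List Char) :
    cs.drop (cs.takeWhile p).length = cs.dropWhile p := by
  induction cs with
  | nil => rfl
  | cons c rest ih =>
    by_cases h : p c
    · simp [h, ih]
    · simp [h]

theorem len_split (p : Char → Bool) (cs : List Char) :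
    (cs.takeWhile p).length + (cs.dropWhile p).length = cs.length := by
  rw [← List.length_append, List.takeWhile_append_dropWhile]

theorem takeWhile_nil_eq (p : Char → Bool) (cs : List Char)
    (h : (cs.takeWhile p).length = 0) : cs.dropWhile p = cs := by
  have := List.takeWhile_append_dropWhile (p := p) (l := cs)
  rw [List.length_eq_zero_iff] at h
  rw [h] at this; simpa using this

theorem check_format_string_spec' (remain : String) :
    check_format_string remain = check_format_string_alt remain := by
  unfold check_format_string check_format_string_alt
  rw [cfsGo_zero]
  set p : Char → Bool := fun c => c == 'u' || c == 'o' || c == 'a' with hp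
  set cs := remain.toList with hcs
  have hdrop := drop_takeWhile_len p cs
  have hlen := len_split p cs
  cases hd : cs.dropWhile p with
  | nil =>
    rw [hd] at hlen
    simp only [List.length_nil, Nat.add_zero] at hlen
    by_cases hnil : cs.length < 1
    · simp [hnil]
    · simp [hnil, hlen]
  | cons c ds =>
    rw [hd] at hdrop hlen
    have hlt : (cs.takeWhile p).length < cs.length := by
      simp only [List.length_cons] at hlen; omega
    have hnotnil : ¬ cs.length < 1 := by omega
    have hget : cs.getD (cs.takeWhile p).length ' ' = c := by
      have h0 : (cs.drop (cs.takeWhile p).length)[0]? = some c := by rw [hdrop]; rfl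
      rw [List.getElem?_drop, Nat.add_zero] at h0
      simp [List.getD]
      rw [h0]
      rfl
    have hne : ((cs.takeWhile p).length == cs.length) = false := by
      simp; omega
    simp only [hnotnil, if_false, hget, hne, Bool.or_false]
    by_cases h0 : (cs.takeWhile p).length = 0
    · have hcseq : cs = c :: ds := by rw [← hd, takeWhile_nil_eq p cs h0]
      have hget0 : cs.getD 0 ' ' = c := by rw [hcseq]; rfl
      simp only [h0, hget0]
      by_cases hc : (c == '-' || c == '+' || c == '=') = true
      · have hds : cs.length - 0 = ds.length + 1 := by rw [hcseq]; simp
        simp only [hc, Bool.not_true, Bool.and_false, beq_self_eq_true, Bool.true_and]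
        have hdrop1 : cs.drop (0 + 1) = ds := by rw [hcseq]; rfl
        rw [hdrop1, hds]
        by_cases hds0 : ds = []
        · subst hds0; simp
        · have hgt1 : ds.length + 1 - 0 > 1 := by
            cases ds with | nil => exact absurd rfl hds0 | cons a b => simp
          simp [hds0]
      · simp only [Bool.not_eq_true] at hc
        simp [hc]
    · have h0' : ((cs.takeWhile p).length == 0) = false := by simpa using h0
      simp only [h0', Bool.false_and]
      by_cases hc : (c == '-' || c == '+' || c == '=') = true
      · simp only [hc, Bool.not_true, Bool.true_and]
        have hdrop1 : cs.drop ((cs.takeWhile p).length + 1) = ds := by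
          have h1 : (cs.drop (cs.takeWhile p).length).drop 1 = ds := by rw [hdrop]; rfl
          rw [List.drop_drop] at h1
          exact h1
        rw [hdrop1]
        have hgt : cs.length - (cs.takeWhile p).length = ds.length + 1 := by
          simp only [List.length_cons] at hlen; omega
        rw [hgt]
        by_cases hds0 : ds = []
        · subst hds0; simp
        · have hgt1 : ds.length + 1 > 1 := by
            cases ds with | nil => exact absurd rfl hds0 | cons a b => simp
          simp [hgt1]
      · simp only [Bool.not_eq_true] at hc
        simp [hc]

-- ===== VERDICT (by name: the statement is the Claim_ definition above) =====
theorem check_format_string_spec : Claim_equal_check_format_string := by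
  intro remain _
  exact check_format_string_spec' remain
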